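-- pv_equiv track=rewrite | github.com/Anchovia/AnchoviaBOJ | Python/Pending/Silver/Silver3/2346.py | solution
-- ===== SOURCE A (Python) =====
-- from collections import deque
--
-- def solution(n, dataList):
--     resultList = []
--     idxList = [i for i in range(1, n + 1)]
--     dataQueue = deque(dataList)
--     idxList = deque(idxList)
--     while n > 0:
--         now = dataQueue.popleft()
--         idx = idxList.popleft()
--         resultList.append(idx)
--         n -= 1
--         if now > 0:
--             dataQueue.rotate(-(now - 1))
--             idxList.rotate(-(now - 1))
--         else:
--             dataQueue.rotate(-now)
--             idxList.rotate(-now)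
--
--     return resultList
-- ===== SOURCE B (Python) =====
-- def solution(n, dataList):
--     # Circular-pointer simulation: pop at an index and advance it modulo the
--     # remaining length, instead of rotating deques.
--     res = []
--     vals = list(dataList)
--     idxs = list(range(1, n + 1))
--     pv = pi = 0
--     m = n
--     while m > 0:
--         now = vals.pop(pv)
--         res.append(idxs.pop(pi))
--         m -= 1
--         shift = now - 1 if now > 0 else now
--         if vals:
--             pv = (pv + shift) % len(vals)
--         if idxs:
--             pi = (pi + shift) % len(idxs)
--     return res
-- ===== Notes on version B (the rewrite author's own statement) =====
-- stated objective: alternative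
-- what changed: Replaces A's two rotated deques by plain lists with circular index pointers: each step pops at the pointer and advances it modulo the remaining length, with no rotation of the data at all.
import Mathlib
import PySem

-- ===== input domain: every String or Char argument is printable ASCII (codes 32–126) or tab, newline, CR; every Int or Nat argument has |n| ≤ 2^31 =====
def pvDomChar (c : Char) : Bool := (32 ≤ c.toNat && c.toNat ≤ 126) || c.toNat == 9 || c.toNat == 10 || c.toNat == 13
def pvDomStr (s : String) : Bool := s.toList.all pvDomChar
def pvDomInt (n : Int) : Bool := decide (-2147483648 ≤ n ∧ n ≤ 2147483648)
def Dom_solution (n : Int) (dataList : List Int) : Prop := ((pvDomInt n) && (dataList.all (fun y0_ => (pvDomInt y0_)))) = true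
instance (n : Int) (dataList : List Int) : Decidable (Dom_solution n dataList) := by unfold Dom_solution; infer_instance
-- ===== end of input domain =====

-- B replaces A's two rotated deques by in-place lists with circular index pointers
-- advanced modulo the remaining length (objective: alternative decomposition, same cost).

-- ===== PORT A =====
-- deque.rotate(k): rotate right by k = rotate left by (-k) mod len; no-op on empty.
def dequeRotate (xs : List Int) (k : Int) : List Int :=
  if _h : xs.length = 0 then xs
  else xs.rotate (PySem.Int.mod (-k) xs.length).toNat

-- the while loop of A; fuel = initial n (loop runs exactly n times, n decremented each pass)
def aLoop : Nat → List Int → List Int → List Int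
  | 0, _, _ => []
  | m + 1, now :: dq, idx :: iq =>
      if now > 0 then
        idx :: aLoop m (dequeRotate dq (-(now - 1))) (dequeRotate iq (-(now - 1)))
      else
        idx :: aLoop m (dequeRotate dq (-now)) (dequeRotate iq (-now))
  | _ + 1, _, _ => []   -- popleft on an empty deque raises: unreachable under Pre_

def solution (n : Int) (dataList : List Int) : List Int :=
  aLoop n.toNat dataList (PySem.List.pyRange 1 (n + 1) 1)

-- ===== PORT B =====
-- the while loop of B: pop at pointer, advance pointer modulo remaining length
def bLoop : Nat → List Int → Int → List Int → Int → List Int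
  | 0, _, _, _, _ => []
  | m + 1, vals, pv, idxs, pi =>
      match PySem.List.pop? vals pv, PySem.List.pop? idxs pi with
      | some (now, vals'), some (idx, idxs') =>
          let shift := if now > 0 then now - 1 else now
          let pv' := if vals'.length = 0 then pv else PySem.Int.mod (pv + shift) vals'.length
          let pi' := if idxs'.length = 0 then pi else PySem.Int.mod (pi + shift) idxs'.length
          idx :: bLoop m vals' pv' idxs' pi'
      | _, _ => []      -- list.pop on an empty list raises: unreachable under Pre_

def solution_alt (n : Int) (dataList : List Int) : List Int :=
  bLoop n.toNat dataList 0 (PySem.List.pyRange 1 (n + 1) 1) 0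

-- ===== PRECONDITION & SPEC =====
-- Pre_ excludes n > len(dataList), where A (and B) raise IndexError popping an emptied deque/list.
def Pre_solution (n : Int) (dataList : List Int) : Prop := n ≤ (dataList.length : Int)
instance (n : Int) (dataList : List Int) : Decidable (Pre_solution n dataList) := by unfold Pre_solution; infer_instance
def pvWitness_solution : Int × List Int := (3, [3, -2, 1])

def Spec_solution (n : Int) (dataList : List Int) (out : List Int) : Prop := out = solution_alt n dataList
instance (n : Int) (dataList : List Int) (out : List Int) : Decidable (Spec_solution n dataList out) := by unfold Spec_solution; infer_instance

-- ===== CLAIM (what is proved, stated in full; the proofs are below) =====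
def Claim_equal_solution : Prop := ∀ (n : Int) (dataList : List Int), Dom_solution n dataList → Pre_solution n dataList → Spec_solution n dataList (solution n dataList)

-- ===== LEMMAS AND PROOFS =====

lemma aLoop_cons (m : Nat) (a b : Int) (as bs : List Int) :
    aLoop (m+1) (a :: as) (b :: bs) =
      b :: aLoop m (dequeRotate as (-(if a > 0 then a - 1 else a)))
                   (dequeRotate bs (-(if a > 0 then a - 1 else a))) := by
  by_cases h : a > 0 <;> simp [aLoop, h]

lemma bLoop_step (m : Nat) (vals idxs : List Int) (k j : Nat) (hk : k < vals.length) (hj : j < idxs.length) :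
    bLoop (m+1) vals (k:Int) idxs (j:Int) =
      idxs[j] :: bLoop m (vals.eraseIdx k)
        (if (vals.eraseIdx k).length = 0 then (k:Int) else PySem.Int.mod ((k:Int) + (if vals[k] > 0 then vals[k] - 1 else vals[k])) ((vals.eraseIdx k).length : Int))
        (idxs.eraseIdx j)
        (if (idxs.eraseIdx j).length = 0 then (j:Int) else PySem.Int.mod ((j:Int) + (if vals[k] > 0 then vals[k] - 1 else vals[k])) ((idxs.eraseIdx j).length : Int)) := by
  rw [bLoop, PySem.List.pop?_natCast (h := hk), PySem.List.pop?_natCast (h := hj)]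
lemma dequeRotate_rotate (l : List Int) (k : Nat) (s : Int) (h : l ≠ []) :
    dequeRotate (l.rotate k) (-s) = l.rotate ((PySem.Int.mod ((k:Int) + s) l.length).toNat) := by
  have hlen : 0 < l.length := List.length_pos_iff.mpr h
  have hLne : ((l.length : Int)) ≠ 0 := by exact_mod_cast hlen.ne'
  unfold dequeRotate
  rw [dif_neg (by rw [List.length_rotate]; omega)]
  rw [neg_neg, List.length_rotate, List.rotate_rotate]
  rw [← List.rotate_mod, ← List.rotate_mod l ((PySem.Int.mod ((k:Int) + s) l.length).toNat)]
  congr 1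
  rw [PySem.Int.mod_eq_emod_of_pos (by exact_mod_cast hlen),
      PySem.Int.mod_eq_emod_of_pos (by exact_mod_cast hlen)]
  have ha0 : 0 ≤ s % (l.length:Int) := Int.emod_nonneg _ hLne
  have hb0 : 0 ≤ ((k:Int) + s) % (l.length:Int) := Int.emod_nonneg _ hLne
  have hblt : ((k:Int) + s) % (l.length:Int) < l.length := Int.emod_lt_of_pos _ (by exact_mod_cast hlen)
  have key : (((k + (s % (l.length:Int)).toNat) % l.length : Nat) : Int) = ((k:Int) + s) % (l.length:Int) := by
    push_cast [Int.toNat_of_nonneg ha0]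
    rw [Int.add_emod, Int.emod_emod_of_dvd s dvd_rfl, ← Int.add_emod]
  have h2 : (k + (s % (l.length:Int)).toNat) % l.length = (((k:Int) + s) % (l.length:Int)).toNat := by omega
  rw [h2, Nat.mod_eq_of_lt (by omega)]

lemma step_next (l' : List Int) (k : Nat) (s : Int) (hk0 : l' = [] → k = 0) :
    ∃ k' : Nat,
      dequeRotate (l'.rotate k) (-s) = l'.rotate k'
      ∧ (if l'.length = 0 then ((k:Int)) else PySem.Int.mod ((k:Int) + s) (l'.length : Int)) = (k':Int)
      ∧ (k' < l'.length ∨ (l' = [] ∧ k' = 0)) := by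
  by_cases h : l' = []
  · refine ⟨0, ?_, ?_, Or.inr ⟨h, rfl⟩⟩
    · subst h; simp [dequeRotate]
    · simp [h, hk0 h]
  · have hlen : 0 < l'.length := List.length_pos_iff.mpr h
    refine ⟨(PySem.Int.mod ((k:Int) + s) l'.length).toNat, dequeRotate_rotate l' k s h, ?_, Or.inl ?_⟩
    · rw [if_neg (by omega), Int.toNat_of_nonneg (PySem.Int.mod_nonneg _ (by exact_mod_cast hlen))]
    · have := PySem.Int.mod_lt ((k:Int) + s) (b := (l'.length:Int)) (by exact_mod_cast hlen)
      have := PySem.Int.mod_nonneg ((k:Int) + s) (b := (l'.length:Int)) (by exact_mod_cast hlen)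
      omega

lemma aLoop_nil_left (m : Nat) (iq : List Int) : aLoop (m+1) [] iq = [] := by cases iq <;> rfl
lemma aLoop_nil_right (m : Nat) (dq : List Int) : aLoop (m+1) dq [] = [] := by cases dq <;> rfl
lemma rotate_cons_eraseIdx {α : Type} (l : List α) (k : Nat) (h : k < l.length) :
    l.rotate k = l[k] :: (l.eraseIdx k).rotate k := by
  rw [List.rotate_eq_drop_append_take (by omega),
      List.rotate_eq_drop_append_take (by rw [List.length_eraseIdx_of_lt h]; omega),
      List.eraseIdx_eq_take_drop_succ]
  rw [List.drop_append_of_le_length (by simp; omega), List.take_append_of_le_length (by simp; omega)]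
  simp [List.take_take]
  rw [List.drop_eq_getElem_cons h]
  rfl

lemma loop_eq : ∀ (m : Nat) (vals : List Int) (k : Nat) (idxs : List Int) (j : Nat),
    (k < vals.length ∨ (vals = [] ∧ k = 0)) →
    (j < idxs.length ∨ (idxs = [] ∧ j = 0)) →
    aLoop m (vals.rotate k) (idxs.rotate j) = bLoop m vals (k:Int) idxs (j:Int) := by
  intro m
  induction m with
  | zero => intro vals k idxs j _ _; rfl
  | succ m ih =>
    intro vals k idxs j hv hj
    by_cases hvE : vals = []
    · subst hvE
      rw [List.rotate_nil, aLoop_nil_left]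
      simp [bLoop, PySem.List.pop?]
    · by_cases hjE : idxs = []
      · subst hjE
        rw [List.rotate_nil, aLoop_nil_right]
        simp [bLoop, PySem.List.pop?]
      · have hk : k < vals.length := by rcases hv with h | ⟨h, _⟩; exact h; exact absurd h hvE
        have hjlt : j < idxs.length := by rcases hj with h | ⟨h, _⟩; exact h; exact absurd h hjE
        rw [rotate_cons_eraseIdx vals k hk, rotate_cons_eraseIdx idxs j hjlt,
            aLoop_cons, bLoop_step m vals idxs k j hk hjlt]
        obtain ⟨k', hAv, hpv, hinvv⟩ := step_next (vals.eraseIdx k) k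
          (if vals[k] > 0 then vals[k] - 1 else vals[k])
          (fun h => by have hl := congrArg List.length h; rw [List.length_eraseIdx_of_lt hk] at hl; simp at hl; omega)
        obtain ⟨j', hAi, hpi, hinvi⟩ := step_next (idxs.eraseIdx j) j
          (if vals[k] > 0 then vals[k] - 1 else vals[k])
          (fun h => by have hl := congrArg List.length h; rw [List.length_eraseIdx_of_lt hjlt] at hl; simp at hl; omega)
        rw [hAv, hAi, hpv, hpi]
        exact congrArg _ (ih _ k' _ j' hinvv hinvi)

-- ===== VERDICT (by name: the statement is the Claim_ definition above) =====
theorem solution_spec : Claim_equal_solution := by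
  intro n dataList _ _
  unfold Spec_solution solution solution_alt
  have hinv1 : (0 < dataList.length ∨ (dataList = [] ∧ (0:Nat) = 0)) := by
    by_cases h : dataList = []
    · exact Or.inr ⟨h, rfl⟩
    · exact Or.inl (List.length_pos_iff.mpr h)
  have hinv2 : (0 < (PySem.List.pyRange 1 (n+1) 1).length ∨ (PySem.List.pyRange 1 (n+1) 1 = [] ∧ (0:Nat) = 0)) := by
    by_cases hn : 0 < n
    · left; rw [PySem.List.length_pyRange_one]; omega
    · right; exact ⟨PySem.List.pyRange_one_eq_nil (by omega), rfl⟩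
  have := loop_eq n.toNat dataList 0 (PySem.List.pyRange 1 (n+1) 1) 0 hinv1 hinv2
  simpa [List.rotate_zero] using this
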